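-- pv_equiv track=rewrite | github.com/bohui/real2ai | backend/app/services/property_valuation_service.py | _extract_location_from_address
-- ===== SOURCE A (Python) =====
-- from typing import Dict, Any, List, Optional
--
-- def _extract_location_from_address(address: str) -> Dict[str, str]:
--     """Extract location components from address string."""
--     # Simple location extraction - in production, use proper address parsing
--     words = address.upper().split()
--
--     # Find Australian state
--     states = ["NSW", "VIC", "QLD", "WA", "SA", "TAS", "ACT", "NT"]
--     state = next((word for word in words if word in states), "NSW")
--
--     # Extract suburb (assume it's before the state)
--     try:
--         state_index = words.index(state)
--         if state_index > 0:
--             suburb = words[state_index - 1]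
--         else:
--             suburb = "Unknown"
--     except ValueError:
--         suburb = "Unknown"
--
--     return {
--         "suburb": suburb.title(),
--         "state": state
--     }
-- ===== SOURCE B (Python) =====
-- def _extract_location_from_address(address: str) -> dict:
--     """Index-based approach: build a first-occurrence index of the words once,
--     then take the minimum position at which any state abbreviation occurs and
--     read the state and the preceding suburb back from the word list by index."""
--     words = address.upper().split()
--     first_at = {}
--     for i, w in enumerate(words):
--         if w not in first_at:
--             first_at[w] = i
--     states = ["NSW", "VIC", "QLD", "WA", "SA", "TAS", "ACT", "NT"]
--     positions = [first_at[s] for s in states if s in first_at]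
--     if positions:
--         i = min(positions)
--         state = words[i]
--         suburb = words[i - 1] if i > 0 else "Unknown"
--     else:
--         state, suburb = "NSW", "Unknown"
--     return {"suburb": suburb.title(), "state": state}
-- ===== Notes on version B (the rewrite author's own statement) =====
-- stated objective: alternative
-- what changed: Replaces A's scan-for-the-first-state-word plus words.index/try-except by a first-occurrence position index (dict) built over enumerate(words), a minimum over the states' positions, and indexed reads of the state and suburb back from the word list.
import Mathlib
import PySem

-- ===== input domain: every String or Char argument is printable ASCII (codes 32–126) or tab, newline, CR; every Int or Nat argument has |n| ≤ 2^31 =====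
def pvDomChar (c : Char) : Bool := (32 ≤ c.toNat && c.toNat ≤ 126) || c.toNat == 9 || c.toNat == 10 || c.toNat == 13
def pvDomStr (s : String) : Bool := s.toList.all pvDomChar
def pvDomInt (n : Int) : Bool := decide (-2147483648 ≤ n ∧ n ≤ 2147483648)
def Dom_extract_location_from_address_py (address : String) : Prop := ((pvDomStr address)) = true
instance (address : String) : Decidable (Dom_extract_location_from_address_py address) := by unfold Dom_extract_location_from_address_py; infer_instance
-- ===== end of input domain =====

-- B replaces A's scan-the-words-then-index approach by a first-occurrence position
-- index over the words, a minimum over the states' positions, and indexed reads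
-- back into the word list (objective: alternative).

-- shared helpers: the Australian-state list literal and str.title (exact on ASCII:
-- Python's cased characters within printable ASCII are exactly the letters)
def pyStates : List String := ["NSW", "VIC", "QLD", "WA", "SA", "TAS", "ACT", "NT"]

def pyTitleAux : List Char → Bool → List Char
  | [], _ => []
  | c :: cs, prevAlpha =>
    if PySem.Chars.isalpha c then
      (if prevAlpha then PySem.Chars.lowerChar c else PySem.Chars.upperChar c) :: pyTitleAux cs true
    else
      c :: pyTitleAux cs false

def pyTitle (s : String) : String := String.ofList (pyTitleAux s.toList false)

-- ===== PORT A =====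
def pyACore (words : List String) : List (String × String) :=
  let state := (words.find? (fun w => pyStates.contains w)).getD "NSW"
  -- words.index(state): some i → words[state_index - 1] (always in range since 0 < i,
  -- so List.getD is exact); none = ValueError branch → "Unknown"
  let suburb :=
    match PySem.List.index? words state with
    | some i => if 0 < i then words.getD (i - 1) "Unknown" else "Unknown"
    | none => "Unknown"
  [("suburb", pyTitle suburb), ("state", state)]

def extract_location_from_address_py (address : String) : List (String × String) :=
  pyACore (PySem.Str.split₀ (PySem.Str.upper address))

-- ===== PORT B =====
-- first_at: dict word → first position, built once over enumerate(words)
def altFirstAt (words : List String) : PySem.Dict String Int :=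
  (PySem.List.enumerate words 0).foldl
    (fun d p => if d.contains p.2 then d else d.insert p.2 p.1) PySem.Dict.empty

-- positions = [first_at[s] for s in states if s in first_at]; i = min(positions);
-- words[i] / words[i-1] are in range (positions come from enumerate), so pyGetD is exact
def pyBCore (words : List String) : List (String × String) :=
  let firstAt := altFirstAt words
  let positions := pyStates.filterMap (fun s => firstAt.get? s)
  match PySem.List.min? positions (fun x => x) with
  | some i =>
      let state := PySem.List.pyGetD words i "Unknown"
      let suburb := if 0 < i then PySem.List.pyGetD words (i - 1) "Unknown" else "Unknown"
      [("suburb", pyTitle suburb), ("state", state)]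
  | none => [("suburb", pyTitle "Unknown"), ("state", "NSW")]

def extract_location_from_address_py_alt (address : String) : List (String × String) :=
  pyBCore (PySem.Str.split₀ (PySem.Str.upper address))

-- ===== PRECONDITION & SPEC =====
def Spec_extract_location_from_address_py (address : String) (out : List (String × String)) : Prop := out = extract_location_from_address_py_alt address
instance (address : String) (out : List (String × String)) : Decidable (Spec_extract_location_from_address_py address out) := by unfold Spec_extract_location_from_address_py; infer_instance

-- ===== CLAIM (what is proved, stated in full; the proofs are below) =====
def Claim_equal_extract_location_from_address_py : Prop := ∀ (address : String), Dom_extract_location_from_address_py address → Spec_extract_location_from_address_py address (extract_location_from_address_py address)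

-- ===== LEMMAS AND PROOFS =====

-- the fold builds exactly the first-occurrence index: lookup = index? shifted by the start
lemma altFirstAt_get (s : String) :
    ∀ (ws : List String) (k : Int) (d : PySem.Dict String Int),
    ((PySem.List.enumerate ws k).foldl
        (fun d p => if d.contains p.2 then d else d.insert p.2 p.1) d).get? s
      = (d.get? s).or ((PySem.List.index? ws s).map (fun n => (n : Int) + k)) := by
  intro ws
  induction ws with
  | nil => intro k d; simp [PySem.List.enumerate]
  | cons x ws ih =>
    intro k d
    rw [PySem.List.enumerate_cons, List.foldl_cons]
    by_cases hxs : x = s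
    · subst hxs
      rw [PySem.List.index?_cons_self]
      by_cases hc : d.contains x
      · have hsome : (d.get? x).isSome := by
          rw [← PySem.Dict.contains_eq_isSome_get? d x]; exact hc
        simp only [hc, if_true, ih]
        cases hget : d.get? x with
        | none => rw [hget] at hsome; simp at hsome
        | some v => simp
      · simp only [hc, ih]
        cases hget : d.get? x with
        | none => simp
        | some v =>
          exfalso
          have : (d.get? x).isSome := by rw [hget]; rfl
          rw [← PySem.Dict.contains_eq_isSome_get? d x] at this
          simp [hc] at this
    · have hne : s ≠ x := fun h => hxs h.symm
      rw [PySem.List.index?_cons_of_ne _ (fun h => hxs h)]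
      have hstep : ∀ d' : PySem.Dict String Int,
          (if d.contains x then d else d.insert x k).get? s = d.get? s := by
        intro _
        by_cases hc : d.contains x
        · simp [hc]
        · simp [hc, PySem.Dict.get?_insert_of_ne _ _ hne]
      rw [ih (k + 1), hstep PySem.Dict.empty]
      cases hidx : PySem.List.index? ws s with
      | none => simp
      | some n =>
        cases d.get? s with
        | some v => rfl
        | none =>
          simp only [Option.none_or]
          simp
          omega

lemma altFirstAt_get₀ (ws : List String) (s : String) :
    (altFirstAt ws).get? s = (PySem.List.index? ws s).map (fun n => (n : Int)) := by
  unfold altFirstAt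
  rw [altFirstAt_get]
  simp [PySem.Dict.empty, PySem.Dict.get?]

-- the key equivalence on the split word list
lemma core_eq (ws : List String) : pyACore ws = pyBCore ws := by
  unfold pyACore pyBCore
  dsimp only
  cases hf : ws.find? (fun w => pyStates.contains w) with
  | none =>
    -- no word is a state ⇒ "NSW" ∉ ws, every state's index? is none
    have hall : ∀ w ∈ ws, pyStates.contains w = false := by
      intro w hw
      have := List.find?_eq_none.mp hf w hw
      simpa using this
    have hnos : ∀ s ∈ pyStates, PySem.List.index? ws s = none := by
      intro s hs
      rw [PySem.List.index?_eq_none_iff]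
      intro hmem
      have := hall s hmem
      rw [List.contains_eq_mem] at this
      simp [hs] at this
    have hpos : pyStates.filterMap (fun s => (altFirstAt ws).get? s) = [] := by
      rw [List.filterMap_eq_nil_iff]
      intro s hs
      rw [altFirstAt_get₀, hnos s hs]
      rfl
    rw [hpos]
    have hnsw : PySem.List.index? ws "NSW" = none := hnos "NSW" (by decide)
    simp only [Option.getD_none, hnsw, PySem.List.min?]
    rfl
  | some st =>
    obtain ⟨hpst, pre, suf, hws, hpre⟩ := List.find?_eq_some_iff_append.mp hf
    have hstmem : st ∈ pyStates := by
      simpa using hpst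
    have hprenot : ∀ w ∈ pre, pyStates.contains w = false := by
      intro w hw; simpa using hpre w hw
    have hstpre : st ∉ pre := fun h => by simp at hprenot; exact (hprenot st h) hstmem
    have hidxst : PySem.List.index? ws st = some pre.length :=
      (PySem.List.index?_eq_some_iff ws st pre.length).mpr ⟨pre, suf, hws, rfl, hstpre⟩
    -- every position is ≥ pre.length, and pre.length is attained (by st)
    have hmempos : ((pre.length : Int)) ∈ pyStates.filterMap (fun s => (altFirstAt ws).get? s) := by
      rw [List.mem_filterMap]
      exact ⟨st, hstmem, by rw [altFirstAt_get₀, hidxst]; rfl⟩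
    have hlow : ∀ i ∈ pyStates.filterMap (fun s => (altFirstAt ws).get? s), (pre.length : Int) ≤ i := by
      intro i hi
      rw [List.mem_filterMap] at hi
      obtain ⟨s, hs, hget⟩ := hi
      rw [altFirstAt_get₀] at hget
      cases hidx : PySem.List.index? ws s with
      | none => rw [hidx] at hget; simp at hget
      | some m =>
        rw [hidx] at hget
        simp at hget
        subst hget
        have hidx2 := hidx
        obtain ⟨hm, hwm, -⟩ := PySem.List.getElem_of_index?_eq_some hidx2
        by_contra hlt
        push_cast at hlt
        have hmlt : m < pre.length := by exact_mod_cast not_le.mp hlt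
        have : ws[m] ∈ pre := by
          subst hws
          rw [List.getElem_append_left hmlt]
          exact List.getElem_mem _
        have hcon := hprenot _ this
        rw [hwm, List.contains_eq_mem] at hcon
        simp [hs] at hcon
    -- min? of the positions is pre.length
    cases hmin : PySem.List.min? (pyStates.filterMap (fun s => (altFirstAt ws).get? s)) (fun x => x) with
    | none =>
      rw [PySem.List.min?_eq_none_iff] at hmin
      rw [hmin] at hmempos
      simp at hmempos
    | some i =>
      have hi1 : i ≤ (pre.length : Int) := PySem.List.min?_isMin hmin _ hmempos
      have hi2 : (pre.length : Int) ≤ i := hlow i (PySem.List.min?_mem hmin)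
      have hieq : i = (pre.length : Int) := le_antisymm hi1 hi2
      subst hieq
      -- state read back by index: ws[pre.length] = st
      have hstate : PySem.List.pyGetD ws ((pre.length : Nat) : Int) "Unknown" = st := by
        rw [PySem.List.pyGetD_natCast]
        subst hws
        rw [List.getD_eq_getElem _ _ (by simp)]
        simp
      simp only [Option.getD_some, hidxst, hstate]
      -- the suburb branches agree: both read index pre.length - 1 (Nat vs Int subtraction agree since 0 < pre.length)
      by_cases hlen : 0 < pre.length
      · have hlt : (0 : Int) < (pre.length : Int) := by exact_mod_cast hlen
        rw [if_pos hlen, if_pos hlt]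
        have : ((pre.length : Int) - 1) = ((pre.length - 1 : Nat) : Int) := by omega
        rw [this, PySem.List.pyGetD_natCast]
      · have h0 : pre.length = 0 := Nat.eq_zero_of_not_pos hlen
        rw [if_neg hlen, if_neg (by omega : ¬ (0:Int) < (pre.length : Int))]

-- ===== VERDICT (by name: the statement is the Claim_ definition above) =====
theorem extract_location_from_address_py_spec : Claim_equal_extract_location_from_address_py := by
  intro address _
  show extract_location_from_address_py address = extract_location_from_address_py_alt address
  unfold extract_location_from_address_py extract_location_from_address_py_alt
  exact core_eq _
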